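-- pv_equiv track=rewrite | github.com/Leandroglez39/Stability | src/experiments.py | overlaping_detection
-- ===== SOURCE A (Python) =====
-- def overlaping_detection(dict: dict) -> dict:
--
--         '''
--         Detect overlaping communities
--
--         Parameters
--         ----------
--         dict: dict
--             Communities dict for all networks in the folder. The key is the network name,
--                 the value is a list of communities
--
--         Returns
--         -------
--         overlaping: dict
--             Overlaping communities dict for all networks. The key is the network name,
--                 the value is a set of overlaping nodes.
--         '''
--
--         overlaping = {}
--
--         for key, value in dict.items():
--             nodes = set()
--             overlaping[key] = set()
--             for community in value:
--                 intersection = nodes.intersection(set(community))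
--                 if len(intersection) > 0:
--                     overlaping[key].update(intersection)
--                     nodes.update(set(community))
--                 else:
--                     nodes.update(set(community))
--
--         return overlaping
-- ===== SOURCE B (Python) =====
-- def overlaping_detection(dict: dict) -> dict:
--     '''Same result via pairwise intersections: a node overlaps iff it lies in
--     two different communities, so union set(c_i) & set(c_j) over all pairs i<j.'''
--     overlaping = {}
--     for key, communities in dict.items():
--         seen_sets = []
--         overlap = set()
--         for community in communities:
--             sj = set(community)
--             for si in seen_sets:
--                 overlap |= si & sj
--             seen_sets.append(sj)
--         overlaping[key] = overlap
--     return overlaping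
-- ===== Notes on version B (the rewrite author's own statement) =====
-- stated objective: alternative
-- what changed: B drops A's running-union `nodes` and its intersection/branch maintenance and instead keeps the list of per-community sets, unioning the pairwise intersections set(c_i) & set(c_j) for i < j; per-network empty community lists still yield an empty set.
import Mathlib
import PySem

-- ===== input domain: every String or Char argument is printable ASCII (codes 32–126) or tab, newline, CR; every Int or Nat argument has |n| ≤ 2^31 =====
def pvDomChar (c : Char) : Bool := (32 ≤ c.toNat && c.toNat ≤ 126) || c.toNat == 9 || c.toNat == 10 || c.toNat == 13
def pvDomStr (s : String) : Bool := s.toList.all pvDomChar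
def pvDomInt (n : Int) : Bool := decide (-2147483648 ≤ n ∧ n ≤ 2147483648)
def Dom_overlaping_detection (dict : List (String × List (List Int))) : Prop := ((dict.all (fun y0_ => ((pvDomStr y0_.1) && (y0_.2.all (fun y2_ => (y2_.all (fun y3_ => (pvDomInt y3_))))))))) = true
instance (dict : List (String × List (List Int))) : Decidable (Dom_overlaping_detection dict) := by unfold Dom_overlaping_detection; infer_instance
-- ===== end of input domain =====

-- B replaces A's running-union/intersection maintenance by a union of pairwise
-- community intersections (alternative decomposition; not faster).
-- Sets are modelled as PySem.Set (distinct elements in first-insertion order).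

-- ===== PORT A =====
def overlaping_detection (dict : List (String × List (List Int))) : List (String × List Int) :=
  (dict.foldl (fun (overlaping : PySem.Dict String (PySem.Set Int)) kv =>
    let key := kv.1
    let value := kv.2
    let overlaping := overlaping.insert key PySem.Set.empty
    let st := value.foldl (fun (st : PySem.Set Int × PySem.Dict String (PySem.Set Int)) community =>
      let nodes := st.1
      let ov := st.2
      let intersection := PySem.Set.inter nodes (PySem.Set.ofList community)
      if PySem.Set.len intersection > 0 then
        (PySem.Set.update nodes (PySem.Set.ofList community),
         PySem.Dict.modify ov key PySem.Set.empty (fun s => PySem.Set.update s intersection))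
      else
        (PySem.Set.update nodes (PySem.Set.ofList community), ov)) (PySem.Set.empty, overlaping)
    st.2) PySem.Dict.empty).items

-- ===== PORT B =====
def overlaping_detection_alt (dict : List (String × List (List Int))) : List (String × List Int) :=
  (dict.foldl (fun (overlaping : PySem.Dict String (PySem.Set Int)) kv =>
    let st := kv.2.foldl (fun (st : List (PySem.Set Int) × PySem.Set Int) community =>
      let sj := PySem.Set.ofList community
      let ov := st.1.foldl (fun ov si => PySem.Set.union ov (PySem.Set.inter si sj)) st.2
      (st.1 ++ [sj], ov)) ([], PySem.Set.empty)
    overlaping.insert kv.1 st.2) PySem.Dict.empty).items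

-- ===== PRECONDITION & SPEC =====
def Spec_overlaping_detection (dict : List (String × List (List Int))) (out : List (String × List Int)) : Prop := out = overlaping_detection_alt dict
instance (dict : List (String × List (List Int))) (out : List (String × List Int)) : Decidable (Spec_overlaping_detection dict out) := by unfold Spec_overlaping_detection; infer_instance

-- ===== CLAIM (what is proved, stated in full; the proofs are below) =====
def Claim_equal_overlaping_detection : Prop := ∀ (dict : List (String × List (List Int))), Dom_overlaping_detection dict → Spec_overlaping_detection dict (overlaping_detection dict)

-- ===== LEMMAS AND PROOFS =====

-- membership lemmas for Set.contains / Set.add / Set.update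
theorem pv_contains_iff (s : PySem.Set Int) (x : Int) :
    PySem.Set.contains s x = true ↔ x ∈ s := by
  simp [PySem.Set.contains]

theorem pv_mem_add {x y : Int} (s : PySem.Set Int) (h : x ∈ s) : x ∈ PySem.Set.add s y := by
  simp only [PySem.Set.add]; split <;> simp [h]

theorem pv_mem_update_left {x : Int} (s : PySem.Set Int) (l : List Int) (h : x ∈ s) :
    x ∈ PySem.Set.update s l := by
  induction l generalizing s with
  | nil => exact h
  | cons y l ih => exact ih _ (pv_mem_add s h)

theorem pv_mem_update_right {x : Int} (s : PySem.Set Int) (l : List Int) (h : x ∈ l) :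
    x ∈ PySem.Set.update s l := by
  induction l generalizing s with
  | nil => cases h
  | cons y l ih =>
    rcases List.mem_cons.mp h with rfl | h'
    · show x ∈ PySem.Set.update (PySem.Set.add s x) l
      apply pv_mem_update_left
      simp only [PySem.Set.add]; split
      · next hc => exact (pv_contains_iff s x).mp hc
      · simp
    · exact ih _ h'

-- add of a member is a no-op
theorem pv_add_of_mem {x : Int} (s : PySem.Set Int) (h : x ∈ s) : PySem.Set.add s x = s := by
  simp only [PySem.Set.add]
  rw [if_pos ((pv_contains_iff s x).mpr h)]

-- update with a filtered list: dropped elements already in the accumulator change nothing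
theorem pv_update_filter (p q : Int → Bool) (l : List Int) (ov : PySem.Set Int)
    (h : ∀ x ∈ l, p x = true → q x = false → x ∈ ov) :
    PySem.Set.update ov (l.filter (fun x => p x && q x)) = PySem.Set.update ov (l.filter p) := by
  induction l generalizing ov with
  | nil => rfl
  | cons x l ih =>
    by_cases hp : p x = true
    · by_cases hq : q x = true
      · simp only [List.filter_cons, hp, hq, Bool.and_self, if_true]
        show PySem.Set.update (PySem.Set.add ov x) _ = PySem.Set.update (PySem.Set.add ov x) _
        exact ih _ (fun y hy hpy hqy => pv_mem_add _ (h y (List.mem_cons_of_mem _ hy) hpy hqy))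
      · have hq' : q x = false := by simpa using hq
        have hmem : x ∈ ov := h x (List.mem_cons_self) hp hq'
        simp only [List.filter_cons, hp, hq', Bool.and_false, if_true]
        show PySem.Set.update ov _ = PySem.Set.update (PySem.Set.add ov x) _
        rw [pv_add_of_mem ov hmem]
        exact ih _ (fun y hy hpy hqy => h y (List.mem_cons_of_mem _ hy) hpy hqy)
    · have hp' : p x = false := by simpa using hp
      simp only [List.filter_cons, hp', Bool.false_and]
      exact ih _ (fun y hy hpy hqy => h y (List.mem_cons_of_mem _ hy) hpy hqy)

-- update by a Nodup list is append-of-the-fresh-elements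
theorem pv_update_eq_append (s : List Int) (nodes : PySem.Set Int) (hs : s.Nodup) :
    PySem.Set.update nodes s = nodes ++ s.filter (fun x => !nodes.contains x) := by
  induction s generalizing nodes with
  | nil => simp [PySem.Set.update]
  | cons x s ih =>
    have hx : x ∉ s := (List.nodup_cons.mp hs).1
    have hns : s.Nodup := (List.nodup_cons.mp hs).2
    show PySem.Set.update (PySem.Set.add nodes x) s = _
    by_cases hc : nodes.contains x = true
    · have hm : x ∈ nodes := (pv_contains_iff nodes x).mp hc
      rw [PySem.Set.add, if_pos hc, ih nodes hns]
      simp [hm]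
    · have hc' : nodes.contains x = false := by simpa using hc
      have hm : x ∉ nodes := by
        intro hmem
        rw [(pv_contains_iff nodes x).mpr hmem] at hc'
        exact Bool.noConfusion hc'
      rw [PySem.Set.add, if_neg (by simpa using hc'), ih (nodes ++ [x]) hns]
      have : s.filter (fun y => !(nodes ++ [x]).contains y) = s.filter (fun y => !nodes.contains y) := by
        apply List.filter_congr
        intro y hy
        have hyx : y ≠ x := fun h => hx (h ▸ hy)
        simp only [PySem.Set.contains] at *
        simp [hyx]
      rw [this]
      simp [hm]

-- key step: intersect the grown union, or add the pairwise intersection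
theorem pv_step (nodes ov : PySem.Set Int) (s : List Int) (t : PySem.Set Int) (hs : s.Nodup) :
    PySem.Set.update ov (PySem.Set.inter (PySem.Set.update nodes s) t) =
      PySem.Set.update (PySem.Set.update ov (PySem.Set.inter nodes t))
        (PySem.Set.inter s t) := by
  rw [pv_update_eq_append s nodes hs]
  unfold PySem.Set.inter
  rw [List.filter_append]
  unfold PySem.Set.update
  rw [List.foldl_append]
  show PySem.Set.update (PySem.Set.update ov _) ((s.filter _).filter _) = _
  rw [List.filter_filter]
  show PySem.Set.update (PySem.Set.update ov (List.filter (fun x => PySem.Set.contains t x) nodes))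
      (List.filter (fun a => PySem.Set.contains t a && !PySem.Set.contains nodes a) s)
    = PySem.Set.update (PySem.Set.update ov (List.filter (fun x => PySem.Set.contains t x) nodes))
      (List.filter (fun x => PySem.Set.contains t x) s)
  apply pv_update_filter
  intro x hxl hp hq
  have hxnodes : x ∈ nodes := by
    have hcx : PySem.Set.contains nodes x = true := by
      cases hb : PySem.Set.contains nodes x
      · rw [hb] at hq; simp at hq
      · rfl
    exact (pv_contains_iff nodes x).mp hcx
  apply pv_mem_update_right
  exact List.mem_filter.mpr ⟨hxnodes, hp⟩

-- distribute one intersection-with-a-union over the list of community sets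
theorem pv_distrib (t : PySem.Set Int) (ss : List (PySem.Set Int)) :
    ∀ (nodes ov : PySem.Set Int), (∀ s ∈ ss, s.Nodup) →
    PySem.Set.update ov (PySem.Set.inter (ss.foldl PySem.Set.update nodes) t) =
      ss.foldl (fun ov si => PySem.Set.union ov (PySem.Set.inter si t))
        (PySem.Set.update ov (PySem.Set.inter nodes t)) := by
  induction ss with
  | nil => intro nodes ov _; rfl
  | cons s rest ih =>
    intro nodes ov hnd
    show PySem.Set.update ov (PySem.Set.inter (rest.foldl PySem.Set.update (PySem.Set.update nodes s)) t) = _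
    rw [ih (PySem.Set.update nodes s) ov (fun s' hs' => hnd s' (List.mem_cons_of_mem _ hs'))]
    rw [pv_step nodes ov s t (hnd s List.mem_cons_self)]
    rfl

-- inserting twice at the same key keeps only the second value
theorem pv_insert_insert (d : PySem.Dict String (PySem.Set Int)) (k : String)
    (v w : PySem.Set Int) : (d.insert k v).insert k w = d.insert k w := by
  unfold PySem.Dict.insert PySem.Dict.contains
  by_cases hc : (d.items.any fun p => p.1 == k) = true
  · simp only [hc, if_true]
    have h1 : (List.map (fun p => if (p.1 == k) = true then ((k, v) : String × PySem.Set Int) else p) d.items |>.any fun p => p.1 == k) = true := by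
      rcases List.any_eq_true.mp hc with ⟨p, hp, hpk⟩
      refine List.any_eq_true.mpr ⟨(k, v), List.mem_map.mpr ⟨p, hp, by simp [hpk]⟩, by simp⟩
    simp only [h1, if_true]
    congr 1
    rw [List.map_map]
    apply List.map_congr_left
    intro p _
    by_cases hpk : (p.1 == k) = true <;> simp [Function.comp, hpk]
  · simp only [hc, Bool.false_eq_true, if_false]
    have h1 : ((d.items ++ [(k, v)]).any fun p => p.1 == k) = true := by
      rw [List.any_append]; simp
    simp only [h1, if_true]
    have hmap : d.items.map (fun p => if (p.1 == k) = true then ((k, w) : String × PySem.Set Int) else p) = d.items := by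
      conv_rhs => rw [← List.map_id d.items]
      apply List.map_congr_left
      intro p hp
      have hpk : (p.1 == k) = false := by
        rcases Bool.eq_false_or_eq_true (p.1 == k) with h | h
        · exact absurd (List.any_eq_true.mpr ⟨p, hp, h⟩) hc
        · exact h
      simp [hpk]
    simp only [List.map_append, hmap]
    simp

-- A's inner loop threads the dict; it equals the pure fold inserted once at the end
theorem pv_dict_fold (key : String) (value : List (List Int)) :
    ∀ (d : PySem.Dict String (PySem.Set Int)) (ovs nodes : PySem.Set Int),
    value.foldl (fun (st : PySem.Set Int × PySem.Dict String (PySem.Set Int)) community =>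
      let nodes := st.1
      let ov := st.2
      let intersection := PySem.Set.inter nodes (PySem.Set.ofList community)
      if PySem.Set.len intersection > 0 then
        (PySem.Set.update nodes (PySem.Set.ofList community),
         PySem.Dict.modify ov key PySem.Set.empty (fun s => PySem.Set.update s intersection))
      else
        (PySem.Set.update nodes (PySem.Set.ofList community), ov)) (nodes, d.insert key ovs)
    = ((value.foldl (fun (st : PySem.Set Int × PySem.Set Int) community =>
        (PySem.Set.update st.1 (PySem.Set.ofList community),
         PySem.Set.update st.2 (PySem.Set.inter st.1 (PySem.Set.ofList community)))) (nodes, ovs)).1,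
       d.insert key ((value.foldl (fun (st : PySem.Set Int × PySem.Set Int) community =>
        (PySem.Set.update st.1 (PySem.Set.ofList community),
         PySem.Set.update st.2 (PySem.Set.inter st.1 (PySem.Set.ofList community)))) (nodes, ovs)).2)) := by
  induction value with
  | nil => intro d ovs nodes; rfl
  | cons c value ih =>
    intro d ovs nodes
    simp only [List.foldl_cons]
    by_cases h : PySem.Set.len (PySem.Set.inter nodes (PySem.Set.ofList c)) > 0
    · simp only [h, if_true]
      have hmod : PySem.Dict.modify (d.insert key ovs) key PySem.Set.empty
          (fun s => PySem.Set.update s (PySem.Set.inter nodes (PySem.Set.ofList c)))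
          = d.insert key (PySem.Set.update ovs (PySem.Set.inter nodes (PySem.Set.ofList c))) := by
        unfold PySem.Dict.modify
        rw [PySem.Dict.getD_insert_self, pv_insert_insert]
      rw [hmod]
      exact ih d _ _
    · simp only [h, if_false]
      have hnil : PySem.Set.inter nodes (PySem.Set.ofList c) = [] := by
        unfold PySem.Set.len at h
        have hle := Int.not_lt.mp h
        have hlen : (PySem.Set.inter nodes (PySem.Set.ofList c)).length = 0 := by omega
        exact List.length_eq_zero_iff.mp hlen
      have h2 : PySem.Set.update ovs (PySem.Set.inter nodes (PySem.Set.ofList c)) = ovs := by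
        rw [hnil]; rfl
      rw [h2]
      exact ih d ovs (PySem.Set.update nodes (PySem.Set.ofList c))

-- the pure A fold equals B's pairwise fold
theorem pv_pure_eq (value : List (List Int)) :
    ∀ (ss : List (PySem.Set Int)) (ov : PySem.Set Int), (∀ s ∈ ss, s.Nodup) →
    (value.foldl (fun (st : PySem.Set Int × PySem.Set Int) community =>
        (PySem.Set.update st.1 (PySem.Set.ofList community),
         PySem.Set.update st.2 (PySem.Set.inter st.1 (PySem.Set.ofList community))))
      (ss.foldl PySem.Set.update PySem.Set.empty, ov)).2
    = (value.foldl (fun (st : List (PySem.Set Int) × PySem.Set Int) community =>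
        let sj := PySem.Set.ofList community
        let ov := st.1.foldl (fun ov si => PySem.Set.union ov (PySem.Set.inter si sj)) st.2
        (st.1 ++ [sj], ov)) (ss, ov)).2 := by
  induction value with
  | nil => intro ss ov _; rfl
  | cons c value ih =>
    intro ss ov hnd
    simp only [List.foldl_cons]
    have h1 : PySem.Set.update (ss.foldl PySem.Set.update PySem.Set.empty) (PySem.Set.ofList c)
        = (ss ++ [PySem.Set.ofList c]).foldl PySem.Set.update PySem.Set.empty := by
      rw [List.foldl_append]; rfl
    have h2 := pv_distrib (PySem.Set.ofList c) ss (PySem.Set.empty) ov hnd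
    have hov0 : PySem.Set.update ov (PySem.Set.inter (PySem.Set.empty : PySem.Set Int) (PySem.Set.ofList c)) = ov := rfl
    rw [hov0] at h2
    have := ih (ss ++ [PySem.Set.ofList c])
      (ss.foldl (fun ov si => PySem.Set.union ov (PySem.Set.inter si (PySem.Set.ofList c))) ov)
      (by
        intro s hs
        rcases List.mem_append.mp hs with h | h
        · exact hnd s h
        · rcases List.mem_singleton.mp h with rfl
          exact PySem.Set.nodup_ofList c)
    rw [h1, h2]
    exact this

-- pointwise-equal steps give equal folds
theorem pv_foldl_congr {α β : Type} {f g : β → α → β} {b : β} {l : List α}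
    (h : ∀ b a, f b a = g b a) : List.foldl f b l = List.foldl g b l := by
  induction l generalizing b with
  | nil => rfl
  | cons x l ih => simp only [List.foldl_cons, h]; exact ih

-- ===== VERDICT (by name: the statement is the Claim_ definition above) =====
theorem overlaping_detection_spec : Claim_equal_overlaping_detection := by
  intro dict _
  unfold Spec_overlaping_detection overlaping_detection overlaping_detection_alt
  congr 1
  apply pv_foldl_congr
  intro d kv
  simp only
  rw [pv_dict_fold kv.1 kv.2 d PySem.Set.empty PySem.Set.empty]
  exact congrArg (fun s => d.insert kv.1 s)
    (pv_pure_eq kv.2 [] PySem.Set.empty (by intro s hs; cases hs))
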